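-- pv_equiv track=rewrite | github.com/prvnlhr/PYTHON_DSA | Data Structure/Stacks and Queues/000. Practice.py | maxInWindow
-- ===== SOURCE A (Python) =====
-- from collections import deque
--
-- def maxInWindow(arr, k):
--     n = len(arr)
--     maxQ = deque()
--     minQ = deque()
--     res = []
--     winEnd = 0
--     winStart = 0
--     while winEnd < n:
--         curr = arr[winEnd]
--
--         while minQ and minQ[-1] > curr:
--             minQ.pop()
--         while maxQ and maxQ[-1] < curr:
--             maxQ.pop()
--         minQ.append(curr)
--         maxQ.append(curr)
--
--         if winEnd - winStart + 1 == k: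
--
--             if minQ and maxQ:
--                 res.append(minQ[0] + maxQ[0])
--
--                 if minQ[0] == arr[winStart]:
--                     minQ.popleft()
--                 if maxQ[0] == arr[winStart]:
--                     maxQ.popleft()
--             else:
--                 res.append(0)
--             winStart += 1
--
--         winEnd += 1
--
--     return res
-- ===== SOURCE B (Python) =====
-- def maxInWindow(arr, k):
--     if k <= 0:
--         return []
--     res = []
--     for i in range(len(arr) - k + 1):
--         window = arr[i:i + k]
--         res.append(max(window) + min(window))
--     return res
-- ===== Notes on version B (the rewrite author's own statement) =====
-- stated objective: simpler
-- what changed: Replaces the single-pass monotonic max/min deques (with front-eviction bookkeeping) by a direct scan: for each window start take the slice arr[i:i+k] and add its max and min; a k<=0 guard returns [] as A does.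
import Mathlib
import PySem

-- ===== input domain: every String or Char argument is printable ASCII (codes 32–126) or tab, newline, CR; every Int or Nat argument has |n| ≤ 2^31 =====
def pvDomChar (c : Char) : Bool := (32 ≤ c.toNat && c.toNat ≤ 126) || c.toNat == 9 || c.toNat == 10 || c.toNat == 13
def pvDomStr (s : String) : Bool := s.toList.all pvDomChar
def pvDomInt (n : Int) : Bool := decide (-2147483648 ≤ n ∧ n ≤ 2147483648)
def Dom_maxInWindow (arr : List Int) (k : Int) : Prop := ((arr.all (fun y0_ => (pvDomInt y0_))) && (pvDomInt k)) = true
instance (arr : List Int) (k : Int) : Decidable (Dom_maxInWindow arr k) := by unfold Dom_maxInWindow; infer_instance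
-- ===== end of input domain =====

-- B replaces A's single-pass monotonic max/min deques by a direct per-window scan
-- (slice, max, min); simpler, same return value on every input (A is total).


-- ===== PORT A =====
-- 'while q and q[-1] > curr: q.pop()' — popping from the right end of the deque
-- is dropWhile on the reversed list, reversed back (exact).
def pvPopRight (p : Int → Bool) (q : List Int) : List Int :=
  (q.reverse.dropWhile p).reverse

-- The while loop over winEnd reads arr[winEnd] sequentially, so it is ported as a
-- recursion on the remaining suffix of arr (curr = head of the suffix = arr[winEnd]);
-- winStart/winEnd are carried as the same Python ints.  arr[winStart] is in range
-- whenever Python reads it (winStart ≤ winEnd < n), ported by PySem.List.pyGetD.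
def pvALoop (arr : List Int) (k : Int) :
    List Int → List Int → List Int → Int → Int → List Int → List Int
  | _maxQ, _minQ, res, _winStart, _winEnd, [] => res
  | maxQ, minQ, res, winStart, winEnd, curr :: rest =>
    let minQ' := pvPopRight (fun x => decide (x > curr)) minQ ++ [curr]
    let maxQ' := pvPopRight (fun x => decide (x < curr)) maxQ ++ [curr]
    if winEnd - winStart + 1 == k then
      if !minQ'.isEmpty && !maxQ'.isEmpty then
        let res' := res ++ [minQ'.headD 0 + maxQ'.headD 0]
        let fr := PySem.List.pyGetD arr winStart 0
        let minQ'' := if minQ'.headD 0 == fr then minQ'.tail else minQ'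
        let maxQ'' := if maxQ'.headD 0 == fr then maxQ'.tail else maxQ'
        pvALoop arr k maxQ'' minQ'' res' (winStart + 1) (winEnd + 1) rest
      else
        pvALoop arr k maxQ' minQ' (res ++ [0]) (winStart + 1) (winEnd + 1) rest
    else
      pvALoop arr k maxQ' minQ' res winStart (winEnd + 1) rest

def maxInWindow (arr : List Int) (k : Int) : List Int :=
  pvALoop arr k [] [] [] 0 0 arr

-- ===== PORT B =====
def maxInWindow_alt (arr : List Int) (k : Int) : List Int :=
  if k ≤ 0 then []
  else
    (PySem.List.pyRange 0 ((arr.length : Int) - k + 1) 1).map (fun i =>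
      let window := PySem.List.slice arr (some i) (some (i + k))
      -- max(window)/min(window): window is nonempty here (k ≥ 1, i + k ≤ n)
      (PySem.List.max? window (fun x => x)).getD 0 +
      (PySem.List.min? window (fun x => x)).getD 0)

-- ===== PRECONDITION & SPEC =====
def Spec_maxInWindow (arr : List Int) (k : Int) (out : List Int) : Prop := out = maxInWindow_alt arr k
instance (arr : List Int) (k : Int) (out : List Int) : Decidable (Spec_maxInWindow arr k out) := by unfold Spec_maxInWindow; infer_instance

-- ===== CLAIM (what is proved, stated in full; the proofs are below) =====
def Claim_equal_maxInWindow : Prop := ∀ (arr : List Int) (k : Int), Dom_maxInWindow arr k → Spec_maxInWindow arr k (maxInWindow arr k)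

-- ===== LEMMAS AND PROOFS =====

-- proof-side model of a monotonic deque: keep w[i] iff r w[i] w[j] for all j > i
def fkeep (r : Int → Int → Bool) : List Int → List Int
  | [] => []
  | x :: xs => if xs.all (r x) then x :: fkeep r xs else fkeep r xs

def rle : Int → Int → Bool := fun a b => decide (a ≤ b)
def rge : Int → Int → Bool := fun a b => decide (b ≤ a)

-- the window arr[s:e] used in the invariant
def win (arr : List Int) (s e : Nat) : List Int := (arr.drop s).take (e - s)

-- B's per-window output
def outw (arr : List Int) (k : Int) (i : Int) : Int :=
  (PySem.List.max? (PySem.List.slice arr (some i) (some (i + k))) (fun x => x)).getD 0 +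
  (PySem.List.min? (PySem.List.slice arr (some i) (some (i + k))) (fun x => x)).getD 0

lemma mem_fkeep {r : Int → Int → Bool} {w : List Int} {y : Int} (h : y ∈ fkeep r w) : y ∈ w := by
  induction w with
  | nil => simp [fkeep] at h
  | cons x xs ih =>
    simp only [fkeep] at h
    split at h
    · rcases List.mem_cons.mp h with rfl | h2
      · exact List.mem_cons_self
      · exact List.mem_cons_of_mem _ (ih h2)
    · exact List.mem_cons_of_mem _ (ih h)

lemma fkeep_ne_nil {r : Int → Int → Bool} {w : List Int} (h : w ≠ []) : fkeep r w ≠ [] := by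
  induction w with
  | nil => exact absurd rfl h
  | cons x xs ih =>
    simp only [fkeep]
    split <;> rename_i hc
    · simp
    · apply ih
      intro hxs
      subst hxs
      simp at hc

lemma head_fkeep_rel {r : Int → Int → Bool}
    (htot : ∀ a b, r a b = true ∨ r b a = true)
    (htrans : ∀ a b c, r a b = true → r b c = true → r a c = true)
    {w : List Int} (h : w ≠ []) (d : Int) :
    ∀ y ∈ w, r ((fkeep r w).headD d) y = true := by
  induction w with
  | nil => exact absurd rfl h
  | cons x xs ih =>
    simp only [fkeep]
    split <;> rename_i hc
    · intro y hy
      rcases List.mem_cons.mp hy with rfl | hy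
      · rcases htot y y with h1 | h1 <;> exact h1
      · exact (List.all_eq_true.mp hc) y hy
    · have hxs : xs ≠ [] := by intro hxs; subst hxs; simp at hc
      intro y hy
      rcases List.mem_cons.mp hy with rfl | hy
      · have : ∃ y0 ∈ xs, ¬ r y y0 = true := by
          by_contra hall
          apply hc
          rw [List.all_eq_true]
          intro z hz
          by_contra hz'
          exact hall ⟨z, hz, hz'⟩
        rcases this with ⟨y0, hy0, hry0⟩
        have h1 := ih hxs y0 hy0
        have h2 : r y0 y = true := (htot y y0).resolve_left hry0
        exact htrans _ _ _ h1 h2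
      · exact ih hxs y hy

lemma head_fkeep_mem {r : Int → Int → Bool} {w : List Int} (h : w ≠ []) (d : Int) :
    (fkeep r w).headD d ∈ w := by
  have hne := fkeep_ne_nil (r := r) h
  cases hq : fkeep r w with
  | nil => exact absurd hq hne
  | cons a t =>
    have : a ∈ fkeep r w := by simp [hq]
    simpa [hq] using mem_fkeep this

lemma fkeep_pairwise {r : Int → Int → Bool} (w : List Int) :
    (fkeep r w).Pairwise (fun a b => r a b = true) := by
  induction w with
  | nil => simp [fkeep]
  | cons x xs ih =>
    simp only [fkeep]
    split <;> rename_i hc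
    · refine List.Pairwise.cons ?_ ih
      intro y hy
      exact (List.all_eq_true.mp hc) y (mem_fkeep hy)
    · exact ih

lemma fkeep_append_singleton (r : Int → Int → Bool) (w : List Int) (c : Int) :
    fkeep r (w ++ [c]) = (fkeep r w).filter (fun x => r x c) ++ [c] := by
  induction w with
  | nil => simp [fkeep]
  | cons x xs ih =>
    simp only [List.cons_append, fkeep, List.all_append, List.all_cons, List.all_nil,
      Bool.and_true]
    by_cases h1 : xs.all (r x) = true
    · by_cases h2 : r x c = true
      · rw [if_pos (by simp [h1, h2]), ih, if_pos h1]
        simp [h2]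
      · rw [if_neg (by simp [h2]), ih, if_pos h1]
        simp [h2]
    · rw [if_neg (by simp [h1]), ih, if_neg h1]

-- popping from the right while the last element fails (r · c) = filtering, on an r-sorted list
lemma popRight_sorted (r : Int → Int → Bool)
    (htrans : ∀ a b c, r a b = true → r b c = true → r a c = true)
    (c : Int) (q : List Int) (hs : q.Pairwise (fun a b => r a b = true)) :
    pvPopRight (fun x => !(r x c)) q = q.filter (fun x => r x c) := by
  induction q using List.reverseRecOn with
  | nil => simp [pvPopRight]
  | append_singleton q a ih =>
    have hq : q.Pairwise (fun a b => r a b = true) := (List.pairwise_append.mp hs).1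
    have hqa : ∀ x ∈ q, r x a = true := by
      intro x hx
      exact (List.pairwise_append.mp hs).2.2 x hx a (by simp)
    by_cases hac : r a c = true
    · have hall : ∀ x ∈ q, r x c = true := fun x hx => htrans _ _ _ (hqa x hx) hac
      have hf : (q ++ [a]).filter (fun x => r x c) = q ++ [a] := by
        apply List.filter_eq_self.mpr
        intro x hx
        rcases List.mem_append.mp hx with h | h
        · exact hall x h
        · simp only [List.mem_singleton] at h
          subst h
          exact hac
      rw [hf]
      unfold pvPopRight
      rw [List.reverse_append, List.reverse_singleton, List.singleton_append,
        List.dropWhile_cons, if_neg (by simp [hac])]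
      simp
    · have hnot : (!(r a c)) = true := by simp [hac]
      have hf : (q ++ [a]).filter (fun x => r x c) = q.filter (fun x => r x c) := by
        simp [List.filter_append, hac]
      rw [hf, ← ih hq]
      unfold pvPopRight
      rw [List.reverse_append, List.reverse_singleton, List.singleton_append,
        List.dropWhile_cons, if_pos hnot]

lemma fkeep_push (r : Int → Int → Bool)
    (htrans : ∀ a b c, r a b = true → r b c = true → r a c = true)
    (w : List Int) (c : Int) :
    pvPopRight (fun x => !(r x c)) (fkeep r w) ++ [c] = fkeep r (w ++ [c]) := by
  rw [popRight_sorted r htrans c _ (fkeep_pairwise w), fkeep_append_singleton]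

lemma fkeep_popleft (r : Int → Int → Bool)
    (htot : ∀ a b, r a b = true ∨ r b a = true)
    (htrans : ∀ a b c, r a b = true → r b c = true → r a c = true)
    (x : Int) (w : List Int) :
    (if (fkeep r (x :: w)).headD 0 == x then (fkeep r (x :: w)).tail else fkeep r (x :: w))
      = fkeep r w := by
  simp only [fkeep]
  split <;> rename_i hc
  · simp
  · have hw : w ≠ [] := by intro h; subst h; simp at hc
    have : ∃ y0 ∈ w, ¬ r x y0 = true := by
      by_contra hall
      apply hc
      rw [List.all_eq_true]
      intro z hz
      by_contra hz'
      exact hall ⟨z, hz, hz'⟩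
    rcases this with ⟨y0, hy0, hry0⟩
    have hhead := head_fkeep_rel htot htrans hw 0 y0 hy0
    have hne : (fkeep r w).headD 0 ≠ x := by
      intro he
      rw [he] at hhead
      exact hry0 hhead
    rw [if_neg (by simpa using hne)]

lemma head_fkeep_rle (w : List Int) (h : w ≠ []) :
    (fkeep rle w).headD 0 = (PySem.List.min? w (fun x => x)).getD 0 := by
  obtain ⟨m, hm⟩ : ∃ m, PySem.List.min? w (fun x => x) = some m := by
    cases hq : PySem.List.min? w (fun x => x) with
    | none => exact absurd ((Iff.mp (PySem.List.min?_eq_none_iff w (fun x => x)) hq)) h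
    | some m => exact ⟨m, rfl⟩
  rw [hm]
  have h1 : m ∈ w := PySem.List.min?_mem hm
  have h2 := PySem.List.min?_isMin hm
  have h3 := head_fkeep_rel (r := rle)
    (fun a b => by simp [rle]; omega) (fun a b c h1 h2 => by simp [rle] at *; omega) h 0
  have h4 := head_fkeep_mem (r := rle) h 0
  have h5 : (fkeep rle w).headD 0 ≤ m := by simpa [rle] using h3 m h1
  have h6 : m ≤ (fkeep rle w).headD 0 := h2 _ h4
  simp only [Option.getD_some]
  omega

lemma head_fkeep_rge (w : List Int) (h : w ≠ []) :
    (fkeep rge w).headD 0 = (PySem.List.max? w (fun x => x)).getD 0 := by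
  obtain ⟨m, hm⟩ : ∃ m, PySem.List.max? w (fun x => x) = some m := by
    cases hq : PySem.List.max? w (fun x => x) with
    | none => exact absurd ((Iff.mp (PySem.List.max?_eq_none_iff w (fun x => x)) hq)) h
    | some m => exact ⟨m, rfl⟩
  rw [hm]
  have h1 : m ∈ w := PySem.List.max?_mem hm
  have h2 := PySem.List.max?_isMax hm
  have h3 := head_fkeep_rel (r := rge)
    (fun a b => by simp [rge]; omega) (fun a b c h1 h2 => by simp [rge] at *; omega) h 0
  have h4 := head_fkeep_mem (r := rge) h 0
  have h5 : m ≤ (fkeep rge w).headD 0 := by simpa [rge] using h3 m h1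
  have h6 : (fkeep rge w).headD 0 ≤ m := h2 _ h4
  simp only [Option.getD_some]
  omega

-- the degenerate case: with k ≤ 0 the window-size test never fires and A returns res
lemma aLoop_nonpos (arr : List Int) (k : Int) (hk : k ≤ 0) :
    ∀ (rest maxQ minQ res : List Int) (s e : Int), s ≤ e →
      pvALoop arr k maxQ minQ res s e rest = res := by
  intro rest
  induction rest with
  | nil => intro _ _ _ _ _ _; simp [pvALoop]
  | cons curr rest ih =>
    intro maxQ minQ res s e hse
    simp only [pvALoop]
    have hne : (e - s + 1 == k) = false := by
      simp only [beq_eq_false_iff_ne]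
      omega
    rw [hne]
    simp only [Bool.false_eq_true, if_false]
    exact ih _ _ _ s (e + 1) (by omega)

lemma win_push (arr : List Int) (s e : Nat) (hse : s ≤ e) (he : e < arr.length) :
    win arr s e ++ [arr[e]] = win arr s (e + 1) := by
  unfold win
  have h1 : e + 1 - s = (e - s) + 1 := by omega
  rw [h1, List.take_add_one]
  have h2 : (arr.drop s)[e - s]? = some arr[e] := by
    rw [List.getElem?_drop]
    rw [List.getElem?_eq_getElem (by omega)]
    congr 1
    congr 1
    omega
  simp [h2]

lemma win_cons (arr : List Int) (s e : Nat) (hse : s < e) (he : e ≤ arr.length) :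
    win arr s e = arr[s]'(by omega) :: win arr (s + 1) e := by
  unfold win
  rw [List.drop_eq_getElem_cons (by omega)]
  have h1 : e - s = (e - (s + 1)) + 1 := by omega
  rw [h1, List.take_succ_cons]

-- main loop invariant
lemma aLoop_inv (arr : List Int) (k : Int) (hk : 1 ≤ k) :
    ∀ (rest : List Int) (e s : Nat) (res : List Int),
      rest = arr.drop e → e ≤ arr.length →
      ((s : Int) = (e : Int) - k + 1 ∨ ((s : Int) = 0 ∧ (e : Int) - k + 1 ≤ 0)) →
      pvALoop arr k (fkeep rge (win arr s e)) (fkeep rle (win arr s e)) res (s : Int) (e : Int) rest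
        = res ++ (PySem.List.pyRange (s : Int) ((arr.length : Int) - k + 1) 1).map (outw arr k) := by
  intro rest
  induction rest with
  | nil =>
    intro e s res hrest he hs
    have hen : e = arr.length := by
      have := congrArg List.length hrest
      simp [List.length_drop] at this
      omega
    rw [PySem.List.pyRange_one_eq_nil (by subst hen; omega)]
    simp [pvALoop]
  | cons curr rest ih =>
    intro e s res hrest he hs
    have helt : e < arr.length := by
      by_contra h
      rw [List.drop_eq_nil_of_le (by omega)] at hrest
      exact List.cons_ne_nil _ _ hrest
    have hcurr : curr = arr[e] := by
      rw [List.drop_eq_getElem_cons helt] at hrest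
      exact (List.cons.injEq _ _ _ _ ▸ hrest).1
    have hrest' : rest = arr.drop (e + 1) := by
      rw [List.drop_eq_getElem_cons helt] at hrest
      exact (List.cons.injEq _ _ _ _ ▸ hrest).2
    have hse' : s ≤ e := by omega
    -- the two pushed deques become the deques of the window extended by curr
    have hminpred : (fun x => decide (x > curr)) = (fun x => !(rle x curr)) := by
      funext x
      by_cases h : x ≤ curr
      · have h2 : ¬ (x > curr) := by omega
        simp [rle, h, h2]
      · have h2 : x > curr := by omega
        simp [rle, h, h2]
    have hmaxpred : (fun x => decide (x < curr)) = (fun x => !(rge x curr)) := by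
      funext x
      by_cases h : curr ≤ x
      · have h2 : ¬ (x < curr) := by omega
        simp [rge, h, h2]
      · have h2 : x < curr := by omega
        simp [rge, h, h2]
    have hminQ : pvPopRight (fun x => decide (x > curr)) (fkeep rle (win arr s e)) ++ [curr]
        = fkeep rle (win arr s (e + 1)) := by
      rw [hminpred, fkeep_push rle (fun a b c h1 h2 => by simp [rle] at *; omega),
        hcurr, win_push arr s e hse' helt]
    have hmaxQ : pvPopRight (fun x => decide (x < curr)) (fkeep rge (win arr s e)) ++ [curr]
        = fkeep rge (win arr s (e + 1)) := by
      rw [hmaxpred, fkeep_push rge (fun a b c h1 h2 => by simp [rge] at *; omega),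
        hcurr, win_push arr s e hse' helt]
    simp only [pvALoop, hminQ, hmaxQ]
    by_cases hcond : (e : Int) - (s : Int) + 1 = k
    · -- window reached size k: emit, pop left, continue with s+1
      rw [if_pos (by simpa using hcond)]
      have hwne : win arr s (e + 1) ≠ [] := by
        unfold win
        have hlen : ((arr.drop s).take (e + 1 - s)).length = e + 1 - s := by
          rw [List.length_take, List.length_drop]
          omega
        intro hnil
        rw [hnil] at hlen
        simp at hlen
        omega
      have hmne : (fkeep rle (win arr s (e + 1))).isEmpty = false := by
        rw [List.isEmpty_eq_false_iff]
        exact fkeep_ne_nil hwne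
      have hMne : (fkeep rge (win arr s (e + 1))).isEmpty = false := by
        rw [List.isEmpty_eq_false_iff]
        exact fkeep_ne_nil hwne
      rw [if_pos (by rw [hmne, hMne]; rfl)]
      have hfr : PySem.List.pyGetD arr (s : Int) 0 = arr[s]'(by omega) := by
        rw [PySem.List.pyGetD_natCast, List.getD_eq_getElem?_getD,
          List.getElem?_eq_getElem (by omega)]
        rfl
      have hwcons : win arr s (e + 1) = arr[s]'(by omega) :: win arr (s + 1) (e + 1) :=
        win_cons arr s (e + 1) (by omega) (by omega)
      have hminpop : (if (fkeep rle (win arr s (e + 1))).headD 0 == PySem.List.pyGetD arr (s : Int) 0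
            then (fkeep rle (win arr s (e + 1))).tail else fkeep rle (win arr s (e + 1)))
          = fkeep rle (win arr (s + 1) (e + 1)) := by
        rw [hfr, hwcons]
        exact fkeep_popleft rle (fun a b => by simp [rle]; omega)
          (fun a b c h1 h2 => by simp [rle] at *; omega) _ _
      have hmaxpop : (if (fkeep rge (win arr s (e + 1))).headD 0 == PySem.List.pyGetD arr (s : Int) 0
            then (fkeep rge (win arr s (e + 1))).tail else fkeep rge (win arr s (e + 1)))
          = fkeep rge (win arr (s + 1) (e + 1)) := by
        rw [hfr, hwcons]
        exact fkeep_popleft rge (fun a b => by simp [rge]; omega)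
          (fun a b c h1 h2 => by simp [rge] at *; omega) _ _
      rw [hminpop, hmaxpop]
      -- the emitted value is B's value for the window starting at s
      have hwin_slice : PySem.List.slice arr (some (s : Int)) (some ((s : Int) + k))
          = win arr s (e + 1) := by
        have hcast : (s : Int) + k = ((e + 1 : Nat) : Int) := by push_cast; omega
        rw [hcast, PySem.List.slice_natCast]
        rfl
      have hout : (fkeep rle (win arr s (e + 1))).headD 0 + (fkeep rge (win arr s (e + 1))).headD 0
          = outw arr k (s : Int) := by
        rw [head_fkeep_rle _ hwne, head_fkeep_rge _ hwne]
        unfold outw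
        rw [hwin_slice]
        omega
      rw [hout]
      have hcast1 : ((s : Int) + 1) = ((s + 1 : Nat) : Int) := by push_cast; ring
      have hcast2 : ((e : Int) + 1) = ((e + 1 : Nat) : Int) := by push_cast; ring
      rw [hcast1, hcast2,
        ih (e + 1) (s + 1) (res ++ [outw arr k (s : Int)]) hrest' (by omega)
          (by left; push_cast; omega)]
      rw [PySem.List.pyRange_one_cons (a := (s : Int)) (by omega), List.map_cons,
        ← hcast1]
      simp [List.append_assoc]
    · -- window not yet of size k (so winStart stays put, necessarily 0)
      rw [if_neg (by simpa using hcond)]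
      have hcast2 : ((e : Int) + 1) = ((e + 1 : Nat) : Int) := by push_cast; ring
      rw [hcast2, ih (e + 1) s res hrest' (by omega) (by right; constructor <;> omega)]

-- ===== VERDICT (by name: the statement is the Claim_ definition above) =====
theorem maxInWindow_spec : Claim_equal_maxInWindow := by
  intro arr k _
  unfold Spec_maxInWindow maxInWindow maxInWindow_alt
  by_cases hk : k ≤ 0
  · rw [if_pos hk]
    exact aLoop_nonpos arr k hk arr [] [] [] 0 0 le_rfl
  · rw [if_neg hk]
    have h := aLoop_inv arr k (by omega) arr 0 0 [] (by simp) (by omega)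
      (by right; constructor <;> omega)
    simp only [win, Nat.sub_self, List.take_zero, fkeep, Nat.cast_zero] at h
    rw [h]
    rfl
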